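-- pv_equiv track=rewrite | github.com/Shlok-Dubey/AI4Bharat | ai-content-agent/backend/agents/campaign_planner.py | _ensure_variety
-- ===== SOURCE A (Python) =====
-- from typing import List, Dict, Optional
--
-- def _ensure_variety(content: List[Dict]) -> List[Dict]:
--     """
--     Ensure variety in content distribution.
--
--     Avoid consecutive posts of same platform or type.
--
--     Args:
--         content: Sorted content list
--
--     Returns:
--         Content list with ensured variety
--     """
--     if len(content) <= 2:
--         return content
--
--     result = [content[0]]
--     remaining = content[1:]
--
--     while remaining:
--         last_item = result[-1]
--         last_platform = last_item.get('platform')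
--         last_type = last_item.get('content_type')
--
--         # Find next item with different platform or type
--         next_item = None
--         for i, item in enumerate(remaining):
--             if (item.get('platform') != last_platform or
--                 item.get('content_type') != last_type):
--                 next_item = remaining.pop(i)
--                 break
--
--         # If no different item found, just take the next one
--         if next_item is None:
--             next_item = remaining.pop(0)
--
--         result.append(next_item)
--
--     return result
-- ===== SOURCE B (Python) =====
-- from typing import List, Dict
--
-- def _ensure_variety(content: List[Dict]) -> List[Dict]:
--     if len(content) <= 2:
--         return content
--
--     def key(item):
--         return (item.get('platform'), item.get('content_type'))
--
--     result = [content[0]]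
--     last_key = key(content[0])
--     # buffer of deferred items (all sharing one key); bj = virtual front of the buffer
--     buf = []
--     bj = 0
--     i = 1
--     while True:
--         if bj < len(buf) and key(buf[bj]) != last_key:
--             # the deferred items differ from the last key: take the earliest one
--             item = buf[bj]
--             bj += 1
--         else:
--             # scan forward, deferring items equal to the last key
--             while i < len(content) and key(content[i]) == last_key:
--                 buf.append(content[i])
--                 i += 1
--             if i < len(content):
--                 item = content[i]
--                 i += 1
--             else:
--                 # everything left shares the last key: drain in order
--                 result.extend(buf[bj:])
--                 break
--         result.append(item)
--         last_key = key(item)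
--     return result
-- ===== Notes on version B (the rewrite author's own statement) =====
-- stated objective: alternative
-- what changed: A repeatedly rescans and pops from the remaining list; B does one left-to-right pass keeping a deferral buffer of items sharing the last emitted (platform, content_type) key, emitting a buffered item whenever its key differs and draining the buffer at the end.
import Mathlib
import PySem

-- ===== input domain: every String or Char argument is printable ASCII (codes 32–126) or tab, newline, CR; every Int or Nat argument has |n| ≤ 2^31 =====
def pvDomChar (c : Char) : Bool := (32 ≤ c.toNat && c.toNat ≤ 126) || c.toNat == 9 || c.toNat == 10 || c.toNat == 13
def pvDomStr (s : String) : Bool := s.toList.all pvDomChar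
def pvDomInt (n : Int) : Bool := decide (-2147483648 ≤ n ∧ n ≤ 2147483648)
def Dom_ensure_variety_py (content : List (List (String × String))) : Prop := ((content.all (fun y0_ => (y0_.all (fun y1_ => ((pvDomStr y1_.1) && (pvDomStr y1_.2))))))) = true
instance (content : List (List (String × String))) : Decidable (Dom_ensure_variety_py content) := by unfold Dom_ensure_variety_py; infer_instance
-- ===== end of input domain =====

-- B replaces A's rescan-and-pop of `remaining` by a single left-to-right pass with a
-- same-key deferral buffer (objective: alternative one-pass algorithm, same results).

-- item.get(k) on the dict
def pvGet (item : List (String × String)) (k : String) : Option String :=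
  (PySem.Dict.mk item).get? k

-- ===== PORT A =====
-- 'for i, item in enumerate(remaining): if different: next_item = remaining.pop(i); break'
def pvPopFirstDiff (lp lt : Option String) :
    List (List (String × String)) →
    Option (List (String × String) × List (List (String × String)))
  | [] => none
  | x :: xs =>
    if (pvGet x "platform" != lp) || (pvGet x "content_type" != lt) then some (x, xs)
    else (pvPopFirstDiff lp lt xs).map (fun p => (p.1, x :: p.2))

theorem pvPopFirstDiff_length (lp lt : Option String) :
    ∀ (l : List (List (String × String))) x rest,
      pvPopFirstDiff lp lt l = some (x, rest) → rest.length + 1 = l.length := by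
  intro l
  induction l with
  | nil => intro x rest h; simp [pvPopFirstDiff] at h
  | cons a as ih =>
    intro x rest h
    simp only [pvPopFirstDiff] at h
    split at h
    · cases h; simp
    · cases hr : pvPopFirstDiff lp lt as with
      | none => rw [hr] at h; simp at h
      | some p =>
        rw [hr] at h
        cases h
        have := ih p.1 p.2 (by rw [hr])
        simp [← this]

-- the 'while remaining:' loop of A
def pvLoopA (last : List (String × String)) :
    List (List (String × String)) → List (List (String × String))
  | [] => []
  | r :: rs =>
    let lp := pvGet last "platform"
    let lt := pvGet last "content_type"
    match h : pvPopFirstDiff lp lt (r :: rs) with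
    | some (x, rest) => x :: pvLoopA x rest
    | none => r :: pvLoopA r rs
termination_by l => l.length
decreasing_by
  · have := pvPopFirstDiff_length lp lt (r :: rs) x rest h
    simp only [List.length_cons] at this ⊢; omega
  · simp

def ensure_variety_py (content : List (List (String × String))) : List (List (String × String)) :=
  if content.length ≤ 2 then content
  else
    match content with
    | [] => content
    | c0 :: rest => c0 :: pvLoopA c0 rest

-- ===== PORT B =====
def pvKey (item : List (String × String)) : Option String × Option String :=
  (pvGet item "platform", pvGet item "content_type")

-- Source B's inner 'while i < len(content) and key(content[i]) == last_key' scan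
def pvSpan (k : Option String × Option String) :
    List (List (String × String)) →
    List (List (String × String)) × List (List (String × String))
  | [] => ([], [])
  | x :: xs =>
    if pvKey x == k then
      let p := pvSpan k xs
      (x :: p.1, p.2)
    else ([], x :: xs)

theorem pvSpan_len (k : Option String × Option String) :
    ∀ l, (pvSpan k l).1.length + (pvSpan k l).2.length = l.length := by
  intro l
  induction l with
  | nil => simp [pvSpan]
  | cons a as ih =>
    simp only [pvSpan]
    split <;> simp <;> omega

-- Source B's outer loop; `buf` models buf[bj:], `stream` models content[i:]
def pvLoopB (k : Option String × Option String)
    (buf stream : List (List (String × String))) : List (List (String × String)) :=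
  match buf with
  | b :: bs =>
    if pvKey b != k then
      b :: pvLoopB (pvKey b) bs stream
    else
      match h : pvSpan k stream with
      | (pre, x :: post) => x :: pvLoopB (pvKey x) (b :: bs ++ pre) post
      | (_, []) => b :: bs ++ stream
  | [] =>
    match h : pvSpan k stream with
    | (pre, x :: post) => x :: pvLoopB (pvKey x) pre post
    | (_, []) => stream
termination_by buf.length + stream.length
decreasing_by
  · simp only [List.length_cons]; omega
  · have := pvSpan_len k stream
    rw [h] at this; simp at this ⊢; omega
  · have := pvSpan_len k stream
    rw [h] at this; simp at this ⊢; omega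

def ensure_variety_py_alt (content : List (List (String × String))) : List (List (String × String)) :=
  if content.length ≤ 2 then content
  else
    match content with
    | [] => content
    | c0 :: rest => c0 :: pvLoopB (pvKey c0) [] rest

-- ===== PRECONDITION & SPEC =====
def Spec_ensure_variety_py (content : List (List (String × String))) (out : List (List (String × String))) : Prop := out = ensure_variety_py_alt content
instance (content : List (List (String × String))) (out : List (List (String × String))) : Decidable (Spec_ensure_variety_py content out) := by unfold Spec_ensure_variety_py; infer_instance

-- ===== CLAIM (what is proved, stated in full; the proofs are below) =====
def Claim_equal_ensure_variety_py : Prop := ∀ (content : List (List (String × String))), Dom_ensure_variety_py content → Spec_ensure_variety_py content (ensure_variety_py content)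

-- ===== LEMMAS AND PROOFS =====

-- A's 'different platform or type' test equals 'different key'
theorem pvCond_eq (x : List (String × String)) (k : Option String × Option String) :
    (((pvGet x "platform" != k.1) || (pvGet x "content_type" != k.2)) = true) ↔ pvKey x ≠ k := by
  simp [pvKey, Prod.ext_iff]
  tauto

theorem pvSpan_append (k : Option String × Option String) :
    ∀ l, (pvSpan k l).1 ++ (pvSpan k l).2 = l := by
  intro l
  induction l with
  | nil => simp [pvSpan]
  | cons a as ih => simp only [pvSpan]; split <;> simp [ih]

theorem pvSpan_prop (k : Option String × Option String) :
    ∀ l, ∀ x ∈ (pvSpan k l).1, pvKey x = k := by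
  intro l
  induction l with
  | nil => simp [pvSpan]
  | cons a as ih =>
    simp only [pvSpan]
    split
    · next hk =>
      intro x hx
      simp at hx
      rcases hx with rfl | hx
      · exact beq_iff_eq.mp hk
      · exact ih x hx
    · simp

theorem pvSpan_all (k : Option String × Option String) :
    ∀ l, (∀ x ∈ l, pvKey x = k) → pvSpan k l = (l, []) := by
  intro l
  induction l with
  | nil => simp [pvSpan]
  | cons a as ih =>
    intro h
    simp only [pvSpan]
    rw [if_pos (by simp [h a (by simp)])]
    rw [ih (fun x hx => h x (by simp [hx]))]

-- pop-first-different in terms of span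
theorem pvPop_eq_span (k : Option String × Option String) :
    ∀ s, pvPopFirstDiff k.1 k.2 s =
      (match pvSpan k s with
       | (pre, x :: post) => some (x, pre ++ post)
       | (_, []) => none) := by
  intro s
  induction s with
  | nil => simp [pvPopFirstDiff, pvSpan]
  | cons a as ih =>
    by_cases hk : pvKey a = k
    · have h1 : pvPopFirstDiff k.1 k.2 (a :: as) =
          (pvPopFirstDiff k.1 k.2 as).map (fun p => (p.1, a :: p.2)) := by
        simp only [pvPopFirstDiff]; rw [if_neg (by simp [pvCond_eq a k, hk])]
      have h2 : pvSpan k (a :: as) = (a :: (pvSpan k as).1, (pvSpan k as).2) := by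
        simp only [pvSpan]; rw [if_pos (by simp [hk])]
      rw [h1, h2, ih]
      cases hs : pvSpan k as with
      | mk pre rest => cases rest <;> simp
    · have h1 : pvPopFirstDiff k.1 k.2 (a :: as) = some (a, as) := by
        simp only [pvPopFirstDiff]; rw [if_pos ((pvCond_eq a k).mpr hk)]
      have h2 : pvSpan k (a :: as) = ([], a :: as) := by
        simp only [pvSpan]; rw [if_neg (by simp [hk])]
      rw [h1, h2]
      rfl

theorem pvPop_buf (k : Option String × Option String) :
    ∀ (buf s : List (List (String × String))), (∀ x ∈ buf, pvKey x = k) →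
      pvPopFirstDiff k.1 k.2 (buf ++ s) =
        (pvPopFirstDiff k.1 k.2 s).map (fun p => (p.1, buf ++ p.2)) := by
  intro buf
  induction buf with
  | nil =>
    intro s _
    simp
  | cons a as ih =>
    intro s h
    have ha : pvKey a = k := h a (by simp)
    simp only [List.cons_append, pvPopFirstDiff]
    rw [if_neg (by simp [pvCond_eq a k, ha])]
    rw [ih s (fun x hx => h x (by simp [hx]))]
    cases pvPopFirstDiff k.1 k.2 s <;> simp

-- when everything remaining shares the last key, A drains in order
theorem pvLoopA_drain :
    ∀ (r : List (List (String × String))) (last : List (String × String)),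
      (∀ x ∈ r, pvKey x = pvKey last) → pvLoopA last r = r := by
  intro r
  induction r with
  | nil => intro last _; simp [pvLoopA]
  | cons y ys ih =>
    intro last h
    have hpop : pvPopFirstDiff (pvGet last "platform") (pvGet last "content_type") (y :: ys) = none := by
      have := pvPop_eq_span (pvKey last) (y :: ys)
      rw [pvSpan_all (pvKey last) (y :: ys) h] at this
      simpa [pvKey] using this
    rw [pvLoopA, hpop]
    rw [ih y (fun x hx => by
      rw [h x (by simp [hx]), ← h y (by simp)])]

-- the main simulation: A on buf ++ stream equals B with deferral buffer buf,
-- provided the buffered items all share one key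
theorem pvMain :
    ∀ (n : ℕ) (buf stream : List (List (String × String))) (last : List (String × String)),
      buf.length + stream.length ≤ n →
      (∀ x ∈ buf, ∀ y ∈ buf, pvKey x = pvKey y) →
      pvLoopA last (buf ++ stream) = pvLoopB (pvKey last) buf stream := by
  intro n
  induction n with
  | zero =>
    intro buf stream last hn _
    have hb : buf = [] := by cases buf <;> simp_all
    have hs : stream = [] := by cases stream <;> simp_all
    subst hb; subst hs
    simp [pvLoopA, pvLoopB, pvSpan]
  | succ n ih =>
    intro buf stream last hn hcom
    cases buf with
    | cons b bs =>
      by_cases hb : pvKey b = pvKey last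
      · -- buffer key equals last key: scan the stream
        have hall : ∀ x ∈ b :: bs, pvKey x = pvKey last := by
          intro x hx
          rw [hcom x hx b (by simp), hb]
        have hpop := pvPop_buf (pvKey last) (b :: bs) stream hall
        rw [pvPop_eq_span (pvKey last) stream] at hpop
        cases hs : pvSpan (pvKey last) stream with
        | mk pre rest =>
          have hlen := pvSpan_len (pvKey last) stream
          have happ := pvSpan_append (pvKey last) stream
          rw [hs] at hpop hlen happ
          cases rest with
          | cons x post =>
            simp only at hpop
            have hA : pvLoopA last ((b :: bs) ++ stream) =
                x :: pvLoopA x ((b :: bs ++ pre) ++ post) := by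
              cases hbs : (b :: bs) ++ stream with
              | nil => simp at hbs
              | cons r rs =>
                rw [pvLoopA]
                rw [← hbs]
                have : pvPopFirstDiff (pvGet last "platform") (pvGet last "content_type")
                    ((b :: bs) ++ stream) = some (x, (b :: bs) ++ (pre ++ post)) := by
                  simpa [pvKey] using hpop
                rw [this]
                simp
            rw [hA]
            rw [pvLoopB]
            rw [if_neg (by simp [hb]), hs]
            simp only []
            congr 1
            have hc : ∀ u ∈ b :: bs ++ pre, ∀ v ∈ b :: bs ++ pre, pvKey u = pvKey v := by
              intro u hu v hv
              have key_of : ∀ w ∈ b :: bs ++ pre, pvKey w = pvKey last := by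
                intro w hw
                simp at hw
                rcases hw with rfl | hw | hw
                · exact hb
                · exact hall w (by simp [hw])
                · exact pvSpan_prop (pvKey last) stream w (by rw [hs]; exact hw)
              rw [key_of u hu, key_of v hv]
            have := ih (b :: bs ++ pre) post x (by simp at hlen hn ⊢; omega) hc
            simpa using this
          | nil =>
            -- nothing different remains: everything left shares the last key
            simp only at hpop
            have hstream : ∀ x ∈ stream, pvKey x = pvKey last := by
              intro x hx
              apply pvSpan_prop (pvKey last) stream
              rw [hs]
              simpa [← happ] using hx
            have hA : pvLoopA last ((b :: bs) ++ stream) = (b :: bs) ++ stream := by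
              apply pvLoopA_drain
              intro x hx
              simp at hx
              rcases hx with rfl | hx | hx
              · exact hb
              · exact hall x (by simp [hx])
              · exact hstream x hx
            rw [hA, pvLoopB, if_neg (by simp [hb]), hs]
      · -- buffer head differs from last key: B takes it; A finds it first
        have hA : pvLoopA last ((b :: bs) ++ stream) = b :: pvLoopA b (bs ++ stream) := by
          rw [List.cons_append, pvLoopA]
          have : pvPopFirstDiff (pvGet last "platform") (pvGet last "content_type")
              (b :: (bs ++ stream)) = some (b, bs ++ stream) := by
            simp only [pvPopFirstDiff]
            rw [if_pos]
            have := (pvCond_eq b (pvKey last)).mpr hb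
            simpa [pvKey] using this
          rw [this]
        rw [hA, pvLoopB, if_pos (by simp [hb])]
        congr 1
        exact ih bs stream b (by simp at hn ⊢; omega)
          (fun x hx y hy => hcom x (by simp [hx]) y (by simp [hy]))
    | nil =>
      simp only [List.nil_append]
      rw [pvLoopB]
      cases hs : pvSpan (pvKey last) stream with
      | mk pre rest =>
        have hlen := pvSpan_len (pvKey last) stream
        have happ := pvSpan_append (pvKey last) stream
        rw [hs] at hlen happ
        cases rest with
        | cons x post =>
          have hpop := pvPop_eq_span (pvKey last) stream
          rw [hs] at hpop
          simp only at hpop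
          have hA : pvLoopA last stream = x :: pvLoopA x (pre ++ post) := by
            cases hstr : stream with
            | nil => rw [hstr] at happ; simp at happ
            | cons r rs =>
              rw [pvLoopA, ← hstr]
              have : pvPopFirstDiff (pvGet last "platform") (pvGet last "content_type") stream
                  = some (x, pre ++ post) := by simpa [pvKey] using hpop
              rw [this]
          rw [hA]
          congr 1
          exact ih pre post x (by simp at hlen hn ⊢; omega)
            (fun u hu v hv => by
              rw [pvSpan_prop (pvKey last) stream u (by rw [hs]; exact hu),
                  pvSpan_prop (pvKey last) stream v (by rw [hs]; exact hv)])
        | nil =>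
          have : ∀ x ∈ stream, pvKey x = pvKey last := by
            intro x hx
            apply pvSpan_prop (pvKey last) stream
            rw [hs]
            simpa [← happ] using hx
          exact pvLoopA_drain stream last this

-- ===== VERDICT (by name: the statement is the Claim_ definition above) =====
theorem ensure_variety_py_spec : Claim_equal_ensure_variety_py := by
  intro content _
  unfold Spec_ensure_variety_py ensure_variety_py ensure_variety_py_alt
  split
  · rfl
  · cases content with
    | nil => rfl
    | cons c0 rest =>
      have := pvMain rest.length [] rest c0 (by simp) (by simp)
      simpa using this
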